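-- pv_equiv track=rewrite | github.com/Klaurx/Russian_SCADA_ASTUE-RTU-custom_protocol-dump | tests/test_crc.py | crc16_kermit_byte
-- ===== SOURCE A (Python) =====
-- def crc16_kermit_byte(byte, crc_in):
--     """
--     CRC-16/KERMIT single-byte accumulation step.
--     Polynomial: 0x8408 (reflected form of 0x1021).
--     Confirmed from disassembly of crc16(unsigned char, unsigned short)
--     at 0x8049e9a in the altclass (qalfat) binary.
--     The XOR immediate 0x8408 is confirmed at address 0x8049eb6.
--     """
--     crc = crc_in ^ byte
--     for _ in range(8):
--         if crc & 0x0001: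
--             crc = (crc >> 1) ^ 0x8408
--         else:
--             crc >>= 1
--     return crc & 0xFFFF
-- ===== SOURCE B (Python) =====
-- def _crc16_kermit_entry(i):
--     c = i
--     for _ in range(8):
--         if c & 0x0001:
--             c = (c >> 1) ^ 0x8408
--         else:
--             c >>= 1
--     return c
--
--
-- TABLE = [_crc16_kermit_entry(i) for i in range(256)]
--
--
-- def crc16_kermit_byte(byte, crc_in):
--     x = crc_in ^ byte
--     return ((x >> 8) ^ TABLE[x & 0xFF]) & 0xFFFF
-- ===== Notes on version B (the rewrite author's own statement) =====
-- stated objective: faster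
-- what changed: Replaces the per-call 8-iteration reflected-shift bit loop by a 256-entry lookup table precomputed once at module load, so each call is one xor, one table lookup, one shift and a mask.
import Mathlib
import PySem

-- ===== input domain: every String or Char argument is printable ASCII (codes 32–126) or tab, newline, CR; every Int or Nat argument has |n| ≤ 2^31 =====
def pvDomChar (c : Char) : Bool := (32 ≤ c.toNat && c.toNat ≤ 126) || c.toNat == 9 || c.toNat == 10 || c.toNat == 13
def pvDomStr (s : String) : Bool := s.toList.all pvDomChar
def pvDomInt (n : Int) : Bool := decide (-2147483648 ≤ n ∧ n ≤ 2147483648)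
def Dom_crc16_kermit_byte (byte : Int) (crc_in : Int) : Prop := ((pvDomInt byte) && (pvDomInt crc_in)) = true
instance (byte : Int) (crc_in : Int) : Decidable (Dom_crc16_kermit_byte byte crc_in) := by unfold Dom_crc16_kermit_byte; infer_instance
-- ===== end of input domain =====

-- B replaces A's per-call 8-iteration bit loop by a 256-entry table precomputed once (objective: faster, constant-factor).

-- B replaces A's per-call 8-iteration bit loop by one lookup in a 256-entry table precomputed once at module load (objective: faster).

-- ===== PORT A =====
def crc16_kermit_byte (byte : Int) (crc_in : Int) : Int :=
  let crc := PySem.Int.bxor crc_in byte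
  let crc := (List.range 8).foldl
    (fun c _ => if PySem.Int.band c 1 != 0 then PySem.Int.bxor (c >>> (1:Nat)) 0x8408 else c >>> (1:Nat)) crc
  PySem.Int.band crc 0xFFFF

-- ===== PORT B =====
-- _crc16_kermit_entry(i): the table-building 8-step loop of Source B
def pvCrcEntry (i : Int) : Int :=
  (List.range 8).foldl
    (fun c _ => if PySem.Int.band c 1 != 0 then PySem.Int.bxor (c >>> (1:Nat)) 0x8408 else c >>> (1:Nat)) i

-- TABLE = [_crc16_kermit_entry(i) for i in range(256)]
def pvCrcTable : List Int := (List.range 256).map (fun i => pvCrcEntry (Int.ofNat i))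

def crc16_kermit_byte_alt (byte : Int) (crc_in : Int) : Int :=
  let x := PySem.Int.bxor crc_in byte
  -- TABLE[x & 0xFF]: the index is always in [0, 255], so the getD default is never used
  let t := (PySem.List.pyGet? pvCrcTable (PySem.Int.band x 255)).getD 0
  PySem.Int.band (PySem.Int.bxor (x >>> (8:Nat)) t) 0xFFFF

-- ===== PRECONDITION & SPEC =====
def Spec_crc16_kermit_byte (byte : Int) (crc_in : Int) (out : Int) : Prop := out = crc16_kermit_byte_alt byte crc_in
instance (byte : Int) (crc_in : Int) (out : Int) : Decidable (Spec_crc16_kermit_byte byte crc_in out) := by unfold Spec_crc16_kermit_byte; infer_instance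

-- ===== CLAIM (what is proved, stated in full; the proofs are below) =====
def Claim_equal_crc16_kermit_byte : Prop := ∀ (byte : Int) (crc_in : Int), Dom_crc16_kermit_byte byte crc_in → Spec_crc16_kermit_byte byte crc_in (crc16_kermit_byte byte crc_in)

-- ===== LEMMAS AND PROOFS =====

-- the shared shape of the loop body, named for the proofs
def pvStep (c : Int) : Int :=
  if PySem.Int.band c 1 != 0 then PySem.Int.bxor (c >>> (1:Nat)) 0x8408 else c >>> (1:Nat)

theorem pv_foldl_range (g : Int → Int) (n : Nat) (x : Int) :
    (List.range n).foldl (fun c _ => g c) x = g^[n] x := by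
  induction n generalizing x with
  | zero => rfl
  | succ m ih =>
      rw [List.range_succ, List.foldl_append, ih]
      simp [Function.iterate_succ_apply']

theorem pv_bxor_eq (a b : Int) : PySem.Int.bxor a b = Int.xor a b := by
  rcases a with m | m <;> rcases b with n | n <;>
    simp [PySem.Int.bxor, Int.xor, Int.negSucc_eq] <;> omega

theorem pv_sub_of_submask (m : Nat) (k : Nat) (h : k &&& m = k) : m - k = m ^^^ k := by
  induction m using Nat.strong_induction_on generalizing k with
  | _ m ih =>
    rcases Nat.eq_zero_or_pos m with hm | hm
    · subst hm
      have : k = 0 := by rw [← h, Nat.and_zero]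
      simp [this]
    · have hk2 : k / 2 &&& m / 2 = k / 2 := by rw [← Nat.and_div_two, h]
      have ihh := ih (m / 2) (by omega) (k / 2) hk2
      have e2 : (m ^^^ k) / 2 = m / 2 ^^^ k / 2 := Nat.xor_div_two
      have e3 : (m ^^^ k) % 2 = (m + k) % 2 := Nat.xor_mod_two_eq
      have e4 : k ≤ m := by rw [← h]; exact Nat.and_le_right
      have e5 : k / 2 ≤ m / 2 := by rw [← hk2]; exact Nat.and_le_right
      have hpar : k % 2 = 1 → m % 2 = 1 := by
        intro hkp
        have hb : ((k &&& m).testBit 0) = k.testBit 0 := by rw [h]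
        rw [Nat.testBit_and] at hb
        by_contra hmp
        have hm0 : m % 2 = 0 := by omega
        simp [hkp, hm0] at hb
      omega

theorem pv_ldiff_eq (m n : Nat) : Nat.ldiff m n = m - (m &&& n) := by
  have hsub : (m &&& n) &&& m = m &&& n := by
    apply Nat.eq_of_testBit_eq
    intro i
    simp only [Nat.testBit_and]
    cases m.testBit i <;> cases n.testBit i <;> rfl
  have h1 : m - (m &&& n) = m ^^^ (m &&& n) := pv_sub_of_submask m (m &&& n) hsub
  rw [h1]
  apply Nat.eq_of_testBit_eq
  intro i
  simp only [Nat.testBit_ldiff, Nat.testBit_xor, Nat.testBit_and]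
  cases m.testBit i <;> cases n.testBit i <;> rfl

theorem pv_band_eq (a b : Int) : PySem.Int.band a b = Int.land a b := by
  rcases a with m | m <;> rcases b with n | n <;>
    simp [PySem.Int.band, Int.land, Int.negSucc_eq, pv_ldiff_eq] <;> omega

theorem pv_testBit_sr (a : Int) (n k : Nat) : (a >>> n).testBit k = a.testBit (n + k) := by
  rcases a with m | m
  · have h : (Int.ofNat m) >>> n = Int.ofNat (m >>> n) := rfl
    rw [h]
    simp [Int.testBit, Nat.testBit_shiftRight]
  · have h : (Int.negSucc m) >>> n = Int.negSucc (m >>> n) := rfl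
    rw [h]
    simp [Int.testBit, Nat.testBit_shiftRight]

theorem pv_int_ext {a b : Int} (h : ∀ k, a.testBit k = b.testBit k) : a = b := by
  have big : ∀ p q : Nat, p < 2 ^ (p + q + 1) := by
    intro p q
    calc p < 2 ^ p := Nat.lt_two_pow_self
    _ ≤ 2 ^ (p + q + 1) := Nat.pow_le_pow_right (by norm_num) (by omega)
  rcases a with m | m <;> rcases b with n | n
  · exact congrArg Int.ofNat (Nat.eq_of_testBit_eq h)
  · exfalso
    have hi := h (m + n + 1)
    simp only [Int.testBit] at hi
    rw [Nat.testBit_lt_two_pow (big m n), Nat.testBit_lt_two_pow (by have := big n m; rwa [Nat.add_comm n m] at this)] at hi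
    simp at hi
  · exfalso
    have hi := h (m + n + 1)
    simp only [Int.testBit] at hi
    rw [Nat.testBit_lt_two_pow (big m n), Nat.testBit_lt_two_pow (by have := big n m; rwa [Nat.add_comm n m] at this)] at hi
    simp at hi
  · have : m = n := Nat.eq_of_testBit_eq (by
      intro i
      have := h i
      simp only [Int.testBit] at this
      cases hm : m.testBit i <;> cases hn : n.testBit i <;> simp [hm, hn] at this ⊢)
    exact congrArg Int.negSucc this

theorem pv_xor_sr (a b : Int) (n : Nat) : (Int.xor a b) >>> n = Int.xor (a >>> n) (b >>> n) := by
  apply pv_int_ext; intro k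
  simp [pv_testBit_sr, Int.testBit_lxor]

theorem pv_sr_sr (x : Int) (n : Nat) : (x >>> (1:Nat)) >>> n = x >>> (n + 1) := by
  apply pv_int_ext; intro k
  rw [pv_testBit_sr (x >>> (1:Nat)) n k, pv_testBit_sr x 1 (n + k), pv_testBit_sr x (n + 1) k]
  congr 1
  omega

theorem pv_land_xor (a b m : Int) : Int.land (Int.xor a b) m = Int.xor (Int.land a m) (Int.land b m) := by
  apply pv_int_ext; intro k
  simp only [Int.testBit_land, Int.testBit_lxor]
  cases a.testBit k <;> cases b.testBit k <;> cases m.testBit k <;> rfl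

theorem pv_xor_assoc (a b c : Int) : Int.xor (Int.xor a b) c = Int.xor a (Int.xor b c) := by
  apply pv_int_ext; intro k
  simp [Int.testBit_lxor]

theorem pv_xor_zero (a : Int) : Int.xor a 0 = a := by
  apply pv_int_ext; intro k
  have h0 : (0 : Int).testBit k = false := by simp [Int.testBit]
  simp [Int.testBit_lxor, h0]

theorem pv_zero_xor (a : Int) : Int.xor 0 a = a := by
  apply pv_int_ext; intro k
  have h0 : (0 : Int).testBit k = false := by simp [Int.testBit]
  simp [Int.testBit_lxor, h0]

theorem pv_mask_testBit (n k : Nat) : (Int.ofNat (2 ^ n - 1)).testBit k = decide (k < n) := by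
  simp [Int.testBit, Nat.testBit_two_pow_sub_one]

theorem pv_land_mask_bounds (x : Int) (m : Nat) :
    ∃ k : Nat, Int.land x (Int.ofNat m) = Int.ofNat k ∧ k ≤ m := by
  rcases x with q | q
  · exact ⟨q &&& m, rfl, Nat.and_le_right⟩
  · refine ⟨Nat.ldiff m q, rfl, ?_⟩
    rw [pv_ldiff_eq]
    omega

theorem pv_sr_small (k n : Nat) (h : k < 2 ^ n) : (Int.ofNat k) >>> n = 0 := by
  have h1 : (Int.ofNat k) >>> n = Int.ofNat (k >>> n) := rfl
  rw [h1, Nat.shiftRight_eq_div_pow, Nat.div_eq_of_lt h]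
  rfl

theorem pv_band_one (c : Int) : PySem.Int.band c 1 = if c.testBit 0 then 1 else 0 := by
  rw [pv_band_eq]
  rcases c with m | m
  · have h : Int.land (Int.ofNat m) 1 = Int.ofNat (m &&& 1) := rfl
    rw [h, Nat.and_one_is_mod]
    simp only [Int.testBit, Nat.testBit_zero]
    by_cases hm : m % 2 = 1 <;> simp [hm] <;> omega
  · have h : Int.land (Int.negSucc m) 1 = Int.ofNat (Nat.ldiff 1 m) := rfl
    rw [h, pv_ldiff_eq, Nat.land_comm, Nat.and_one_is_mod]
    simp only [Int.testBit, Nat.testBit_zero]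
    by_cases hm : m % 2 = 1 <;> simp [hm] <;> omega

theorem pv_step_eq (c : Int) :
    pvStep c = Int.xor (c >>> (1:Nat)) (if c.testBit 0 then 33800 else 0) := by
  unfold pvStep
  rw [pv_band_one]
  cases hc : c.testBit 0
  · simp [pv_xor_zero]
  · simp [pv_bxor_eq]

theorem pv_sr_zero (x : Int) : x >>> (0:Nat) = x := by
  apply pv_int_ext; intro k
  rw [pv_testBit_sr]
  simp

theorem pv_land_zero (x : Int) : Int.land x 0 = 0 := by
  rcases x with m | m
  · have h : Int.land (Int.ofNat m) 0 = Int.ofNat (m &&& 0) := rfl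
    rw [h, Nat.and_zero]
    rfl
  · have h : Int.land (Int.negSucc m) 0 = Int.ofNat (Nat.ldiff 0 m) := rfl
    rw [h, pv_ldiff_eq]
    simp

theorem pv_mask_bit0 (x : Int) (n : Nat) :
    (Int.land x (Int.ofNat (2 ^ (n + 1) - 1))).testBit 0 = x.testBit 0 := by
  rw [Int.testBit_land]
  have h : (Int.ofNat (2 ^ (n + 1) - 1)).testBit 0 = true := by
    rw [pv_mask_testBit]
    simp
  rw [h, Bool.and_true]

theorem pv_mask_shift (x : Int) (n : Nat) :
    Int.land ((Int.land x (Int.ofNat (2 ^ (n + 1) - 1))) >>> (1:Nat)) (Int.ofNat (2 ^ n - 1))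
      = Int.land (x >>> (1:Nat)) (Int.ofNat (2 ^ n - 1)) := by
  apply pv_int_ext; intro k
  simp only [Int.testBit_land, pv_testBit_sr, pv_mask_testBit]
  by_cases hk : k < n
  · have h1 : 1 + k < n + 1 := by omega
    simp [hk, h1]
  · simp [hk]

theorem pv_main (n : Nat) (x : Int) :
    pvStep^[n] x = Int.xor (x >>> n) (pvStep^[n] (Int.land x (Int.ofNat (2 ^ n - 1)))) := by
  induction n generalizing x with
  | zero =>
      have h1 : Int.land x (Int.ofNat (2 ^ 0 - 1)) = 0 := by
        have : Int.ofNat (2 ^ 0 - 1) = 0 := rfl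
        rw [this]
        exact pv_land_zero x
      simp only [Function.iterate_zero, id_eq]
      rw [h1, pv_sr_zero x, pv_xor_zero]
  | succ n ih =>
      obtain ⟨kr, hkr, hkr2⟩ := pv_land_mask_bounds x (2 ^ (n + 1) - 1)
      have h0 : (Int.land x (Int.ofNat (2 ^ (n + 1) - 1))) >>> ((n + 1):Nat) = 0 := by
        rw [hkr]
        exact pv_sr_small kr (n + 1) (by have := Nat.two_pow_pos (n + 1); omega)
      have hstep_r : pvStep (Int.land x (Int.ofNat (2 ^ (n + 1) - 1)))
          = Int.xor ((Int.land x (Int.ofNat (2 ^ (n + 1) - 1))) >>> (1:Nat))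
              (if x.testBit 0 then (33800:Int) else 0) := by
        rw [pv_step_eq, pv_mask_bit0]
      calc pvStep^[n + 1] x
          = pvStep^[n] (pvStep x) := Function.iterate_succ_apply _ _ _
        _ = Int.xor ((pvStep x) >>> n) (pvStep^[n] (Int.land (pvStep x) (Int.ofNat (2 ^ n - 1)))) := ih _
        _ = Int.xor (Int.xor (x >>> ((n + 1):Nat)) ((if x.testBit 0 then (33800:Int) else 0) >>> n))
              (pvStep^[n] (Int.xor (Int.land (x >>> (1:Nat)) (Int.ofNat (2 ^ n - 1)))
                (Int.land (if x.testBit 0 then (33800:Int) else 0) (Int.ofNat (2 ^ n - 1))))) := by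
              rw [pv_step_eq x, pv_xor_sr, pv_sr_sr, pv_land_xor]
        _ = Int.xor (x >>> ((n + 1):Nat))
              (Int.xor ((if x.testBit 0 then (33800:Int) else 0) >>> n)
                (pvStep^[n] (Int.xor (Int.land (x >>> (1:Nat)) (Int.ofNat (2 ^ n - 1)))
                  (Int.land (if x.testBit 0 then (33800:Int) else 0) (Int.ofNat (2 ^ n - 1)))))) :=
              pv_xor_assoc _ _ _
        _ = Int.xor (x >>> ((n + 1):Nat)) (pvStep^[n + 1] (Int.land x (Int.ofNat (2 ^ (n + 1) - 1)))) := by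
              conv_rhs => rw [Function.iterate_succ_apply, hstep_r, ih, pv_xor_sr, pv_sr_sr, h0,
                pv_zero_xor, pv_land_xor, pv_mask_shift]

theorem pv_entry_eq (i : Int) : pvCrcEntry i = pvStep^[8] i := pv_foldl_range pvStep 8 i

theorem pv_lookup (x : Int) :
    (PySem.List.pyGet? pvCrcTable (PySem.Int.band x 255)).getD 0 = pvStep^[8] (PySem.Int.band x 255) := by
  rw [pv_band_eq]
  have h255 : (255 : Int) = Int.ofNat 255 := rfl
  rw [h255]
  obtain ⟨k, hk, hk2⟩ := pv_land_mask_bounds x 255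
  rw [hk]
  have hc : (Int.ofNat k) = ((k : Nat) : Int) := rfl
  rw [hc, PySem.List.pyGet?_natCast]
  simp [pvCrcTable, (by omega : k < 256), pv_entry_eq]

-- ===== VERDICT (by name: the statement is the Claim_ definition above) =====
theorem crc16_kermit_byte_spec : Claim_equal_crc16_kermit_byte := by
  intro byte crc_in _
  unfold Spec_crc16_kermit_byte crc16_kermit_byte crc16_kermit_byte_alt
  dsimp only
  rw [show (List.range 8).foldl
      (fun c _ => if PySem.Int.band c 1 != 0 then PySem.Int.bxor (c >>> (1:Nat)) 0x8408 else c >>> (1:Nat))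
      (PySem.Int.bxor crc_in byte) = pvStep^[8] (PySem.Int.bxor crc_in byte) from
    pv_foldl_range pvStep 8 _]
  rw [pv_lookup, pv_main 8 (PySem.Int.bxor crc_in byte)]
  simp only [pv_band_eq, pv_bxor_eq]
  have hm : (Int.ofNat (2 ^ 8 - 1)) = (255 : Int) := rfl
  rw [hm]
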